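-- pv_equiv track=rewrite | github.com/jim-schwoebel/allie | datasets/augmentation/augment.py | classifyfolder
-- ===== SOURCE A (Python) =====
-- def classifyfolder(listdir):
--     filetypes=list()
--     for i in range(len(listdir)):
--         if listdir[i].endswith(('.mp3', '.wav')):
--             filetypes.append('audio')
--         elif listdir[i].endswith(('.png', '.jpg')):
--             filetypes.append('image')
--         elif listdir[i].endswith(('.txt')):
--             filetypes.append('text')
--         elif listdir[i].endswith(('.mp4', '.avi')):
--             filetypes.append('video')
--         elif listdir[i].endswith(('.csv')):
--             filetypes.append('csv')
--
--     counts={'audio': filetypes.count('audio'),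
--             'image': filetypes.count('image'),
--             'text': filetypes.count('text'),
--             'video': filetypes.count('video'),
--             'csv': filetypes.count('csv')}
--
--     # get back the type of folder (main file type)
--     filetypes=list(counts)
--     values=list(counts.values())
--     index=values.index(max(values))
--
--     return filetypes[index]
-- ===== SOURCE B (Python) =====
-- def classifyfolder(listdir):
--     table = [('audio', ('.mp3', '.wav')),
--              ('image', ('.png', '.jpg')),
--              ('text', ('.txt',)),
--              ('video', ('.mp4', '.avi')),
--              ('csv', ('.csv',))]
--     best, bestn = 'audio', -1
--     for cat, exts in table:
--         n = sum(1 for f in listdir if f.endswith(exts))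
--         if n > bestn:
--             best, bestn = cat, n
--     return best
-- ===== Notes on version B (the rewrite author's own statement) =====
-- stated objective: idiomatic
-- what changed: Replaces the per-file elif-chain that builds an intermediate label list plus dict/count/index argmax with a category->extensions table scanned with a running first-strict-max argmax (initialised to ('audio', -1), preserving the tie-break and the all-zero 'audio' default).
import Mathlib
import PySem

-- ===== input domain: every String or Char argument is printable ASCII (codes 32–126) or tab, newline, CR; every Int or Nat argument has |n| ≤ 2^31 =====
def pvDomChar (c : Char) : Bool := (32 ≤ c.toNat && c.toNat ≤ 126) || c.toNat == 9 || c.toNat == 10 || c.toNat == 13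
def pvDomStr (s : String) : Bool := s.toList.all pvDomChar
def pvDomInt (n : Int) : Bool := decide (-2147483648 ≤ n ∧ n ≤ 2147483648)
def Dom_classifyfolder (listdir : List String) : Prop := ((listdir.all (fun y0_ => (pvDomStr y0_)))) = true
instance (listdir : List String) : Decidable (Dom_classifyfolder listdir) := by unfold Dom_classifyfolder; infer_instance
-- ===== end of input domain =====

-- B replaces A's per-file elif-chain + intermediate label list + dict/count/index argmax by a
-- category→extensions table scanned with a running first-strict-max argmax (same tie-break, same
-- all-zero 'audio' default); objective: idiomatic, same O(n) cost.

-- ===== PORT A =====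
-- the for-loop over range(len(listdir)) building `filetypes` in file order
def pvBuildA : List String → List String
  | [] => []
  | s :: rest =>
    (if PySem.Str.endswith s ".mp3" || PySem.Str.endswith s ".wav" then ["audio"]
     else if PySem.Str.endswith s ".png" || PySem.Str.endswith s ".jpg" then ["image"]
     else if PySem.Str.endswith s ".txt" then ["text"]
     else if PySem.Str.endswith s ".mp4" || PySem.Str.endswith s ".avi" then ["video"]
     else if PySem.Str.endswith s ".csv" then ["csv"]
     else []) ++ pvBuildA rest

def classifyfolder (listdir : List String) : String :=
  let ft := pvBuildA listdir
  -- the dict literal `counts` (distinct keys, insertion order) as its association list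
  let counts : List (String × Int) :=
    [("audio", (PySem.List.count ft "audio" : Int)),
     ("image", (PySem.List.count ft "image" : Int)),
     ("text",  (PySem.List.count ft "text"  : Int)),
     ("video", (PySem.List.count ft "video" : Int)),
     ("csv",   (PySem.List.count ft "csv"   : Int))]
  let filetypes := counts.map Prod.fst      -- list(counts)
  let values := counts.map Prod.snd         -- list(counts.values())
  let m := (PySem.List.max? values (fun v => v)).getD 0        -- max(values); values has 5 entries, never none
  let index := (PySem.List.index? values m).getD 0             -- values.index(max); max ∈ values, never none
  (PySem.List.pyGet? filetypes (index : Int)).getD ""          -- filetypes[index]; index < 5, never none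

-- ===== PORT B =====
-- sum(1 for f in listdir if f.endswith(exts))
def pvCountEnds (listdir : List String) (exts : List String) : Int :=
  listdir.foldl (fun n f => if exts.any (fun e => PySem.Str.endswith f e) then n + 1 else n) 0

def classifyfolder_alt (listdir : List String) : String :=
  let table : List (String × List String) :=
    [("audio", [".mp3", ".wav"]), ("image", [".png", ".jpg"]), ("text", [".txt"]),
     ("video", [".mp4", ".avi"]), ("csv", [".csv"])]
  (table.foldl (fun best ce =>
      let n := pvCountEnds listdir ce.2
      if best.2 < n then (ce.1, n) else best) ("audio", (-1 : Int))).1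

-- ===== PRECONDITION & SPEC =====
def Spec_classifyfolder (listdir : List String) (out : String) : Prop := out = classifyfolder_alt listdir
instance (listdir : List String) (out : String) : Decidable (Spec_classifyfolder listdir out) := by unfold Spec_classifyfolder; infer_instance

-- ===== CLAIM (what is proved, stated in full; the proofs are below) =====
def Claim_equal_classifyfolder : Prop := ∀ (listdir : List String), Dom_classifyfolder listdir → Spec_classifyfolder listdir (classifyfolder listdir)

-- ===== LEMMAS AND PROOFS =====

-- two suffixes of the same string with equal length are equal
lemma pv_suffix_eq (s x y : String) (hx : PySem.Str.endswith s x = true)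
    (hy : PySem.Str.endswith s y = true) (hlen : x.toList.length = y.toList.length) : x = y := by
  rw [PySem.Str.endswith_eq] at hx hy
  obtain ⟨t1, h1⟩ := (PySem.Chars.endswith_iff _ _).mp hx
  obtain ⟨t2, h2⟩ := (PySem.Chars.endswith_iff _ _).mp hy
  have h := h1.trans h2.symm
  have hL := congrArg List.length h
  rw [List.length_append, List.length_append] at hL
  exact String.toList_inj.mp (List.append_inj h (by omega)).2

-- distinct same-length extensions: at most one can match
lemma pv_ends_ne (s x y : String) (hlen : x.toList.length = y.toList.length) (hne : x ≠ y)
    (hx : PySem.Str.endswith s x = true) : PySem.Str.endswith s y = false := by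
  by_cases hy : PySem.Str.endswith s y = true
  · exact absurd (pv_suffix_eq s x y hx hy hlen) hne
  · simpa using hy

-- A's five label counts are the five per-category endswith counts
lemma pv_counts (L : List String) :
    List.count "audio" (pvBuildA L) = L.countP (fun s => PySem.Str.endswith s ".mp3" || PySem.Str.endswith s ".wav") ∧
    List.count "image" (pvBuildA L) = L.countP (fun s => PySem.Str.endswith s ".png" || PySem.Str.endswith s ".jpg") ∧
    List.count "text"  (pvBuildA L) = L.countP (fun s => PySem.Str.endswith s ".txt") ∧
    List.count "video" (pvBuildA L) = L.countP (fun s => PySem.Str.endswith s ".mp4" || PySem.Str.endswith s ".avi") ∧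
    List.count "csv"   (pvBuildA L) = L.countP (fun s => PySem.Str.endswith s ".csv") := by
  induction L with
  | nil => simp [pvBuildA]
  | cons s L ih =>
    obtain ⟨ia, ii, it, iv, ic⟩ := ih
    by_cases h1 : (PySem.Str.endswith s ".mp3" || PySem.Str.endswith s ".wav") = true
    · rcases Bool.or_eq_true_iff.mp h1 with h | h <;>
      · have f1 := pv_ends_ne s _ ".png" (by decide) (by decide) h
        have f2 := pv_ends_ne s _ ".jpg" (by decide) (by decide) h
        have f3 := pv_ends_ne s _ ".txt" (by decide) (by decide) h
        have f4 := pv_ends_ne s _ ".mp4" (by decide) (by decide) h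
        have f5 := pv_ends_ne s _ ".avi" (by decide) (by decide) h
        have f6 := pv_ends_ne s _ ".csv" (by decide) (by decide) h
        simp only [pvBuildA]
        rw [if_pos h1]
        simp_all
    · by_cases h2 : (PySem.Str.endswith s ".png" || PySem.Str.endswith s ".jpg") = true
      · rcases Bool.or_eq_true_iff.mp h2 with h | h <;>
        · have f3 := pv_ends_ne s _ ".txt" (by decide) (by decide) h
          have f4 := pv_ends_ne s _ ".mp4" (by decide) (by decide) h
          have f5 := pv_ends_ne s _ ".avi" (by decide) (by decide) h
          have f6 := pv_ends_ne s _ ".csv" (by decide) (by decide) h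
          simp only [pvBuildA]
          rw [if_neg h1, if_pos h2]
          simp_all
      · by_cases h3 : PySem.Str.endswith s ".txt" = true
        · have f4 := pv_ends_ne s _ ".mp4" (by decide) (by decide) h3
          have f5 := pv_ends_ne s _ ".avi" (by decide) (by decide) h3
          have f6 := pv_ends_ne s _ ".csv" (by decide) (by decide) h3
          simp only [pvBuildA]
          rw [if_neg h1, if_neg h2, if_pos h3]
          simp_all
        · by_cases h4 : (PySem.Str.endswith s ".mp4" || PySem.Str.endswith s ".avi") = true
          · rcases Bool.or_eq_true_iff.mp h4 with h | h <;>
            · have f6 := pv_ends_ne s _ ".csv" (by decide) (by decide) h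
              simp only [pvBuildA]
              rw [if_neg h1, if_neg h2, if_neg h3, if_pos h4]
              simp_all
          · by_cases h5 : PySem.Str.endswith s ".csv" = true
            · simp only [pvBuildA]
              rw [if_neg h1, if_neg h2, if_neg h3, if_neg h4, if_pos h5]
              simp_all
            · simp only [pvBuildA]
              rw [if_neg h1, if_neg h2, if_neg h3, if_neg h4, if_neg h5]
              simp_all

lemma pv_mem_foldl_max (l : List Int) (a : Int) : l.foldl max a = a ∨ l.foldl max a ∈ l := by
  induction l generalizing a with
  | nil => left; rfl
  | cons x t ih =>
    rcases ih (max a x) with h | h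
    · rcases max_cases a x with ⟨he, _⟩ | ⟨he, _⟩
      · left; rw [List.foldl_cons, h, he]
      · right; rw [List.foldl_cons, h, he]; exact List.mem_cons_self
    · right; exact List.mem_cons_of_mem x h

-- B's running first-strict-max foldl = (key at the first index of the max, the max)
lemma pv_foldl_argmax (ps : List (String × Int)) (k0 : String) (v0 : Int) :
    ps.foldl (fun best ce => if best.2 < ce.2 then (ce.1, ce.2) else best) (k0, v0) =
      ((if v0 < (ps.map Prod.snd).foldl max v0 then
          (match PySem.List.index? (ps.map Prod.snd) ((ps.map Prod.snd).foldl max v0) with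
           | some i => (ps.map Prod.fst).getD i ""
           | none => k0)
        else k0), (ps.map Prod.snd).foldl max v0) := by
  induction ps generalizing k0 v0 with
  | nil => simp
  | cons p ps ih =>
    obtain ⟨k, v⟩ := p
    have hle := (PySem.List.le_foldl_max (ps.map Prod.snd) (max v0 v)).1
    simp only [List.foldl_cons, List.map_cons]
    by_cases hv : v0 < v
    · rw [if_pos hv]
      rw [ih k v]
      have hmax : max v0 v = v := max_eq_right hv.le
      rw [hmax] at hle ⊢
      have hout : v0 < (ps.map Prod.snd).foldl max v := lt_of_lt_of_le hv hle
      rw [if_pos hout]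
      by_cases hvM : v < (ps.map Prod.snd).foldl max v
      · rw [if_pos hvM]
        have hmem : (ps.map Prod.snd).foldl max v ∈ ps.map Prod.snd := by
          rcases pv_mem_foldl_max (ps.map Prod.snd) v with h | h
          · omega
          · exact h
        obtain ⟨i, hi⟩ := Option.isSome_iff_exists.mp
          ((PySem.List.index?_isSome_iff _ _).mpr hmem)
        have hne' : v ≠ (ps.map Prod.snd).foldl max v := by omega
        rw [PySem.List.index?_cons_of_ne _ hne', hi]
        simp
      · rw [if_neg hvM]
        have hvEq : v = (ps.map Prod.snd).foldl max v := by
          have := (PySem.List.le_foldl_max (ps.map Prod.snd) v).1; omega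
        rw [← hvEq, PySem.List.index?_cons_self]
        simp
    · rw [if_neg hv]
      rw [ih k0 v0]
      have hmax : max v0 v = v0 := max_eq_left (by omega)
      rw [hmax] at hle ⊢
      by_cases h0 : v0 < (ps.map Prod.snd).foldl max v0
      · rw [if_pos h0, if_pos h0]
        have hmem : (ps.map Prod.snd).foldl max v0 ∈ ps.map Prod.snd := by
          rcases pv_mem_foldl_max (ps.map Prod.snd) v0 with h | h
          · omega
          · exact h
        obtain ⟨i, hi⟩ := Option.isSome_iff_exists.mp
          ((PySem.List.index?_isSome_iff _ _).mpr hmem)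
        have hne' : v ≠ (ps.map Prod.snd).foldl max v0 := by omega
        rw [PySem.List.index?_cons_of_ne _ hne', hi]
        simp
      · rw [if_neg h0, if_neg h0]

-- B's comprehension counter is a countP
lemma pv_cnt (L : List String) (exts : List String) (p : String → Bool)
    (hp : ∀ s, exts.any (fun e => PySem.Str.endswith s e) = p s) :
    pvCountEnds L exts = (L.countP p : Int) := by
  unfold pvCountEnds
  rw [PySem.List.foldl_if_add_one, zero_add]
  congr 1
  apply List.countP_congr
  intro a _
  rw [hp a]

-- ===== VERDICT (by name: the statement is the Claim_ definition above) =====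
theorem classifyfolder_spec : Claim_equal_classifyfolder := by
  intro L _
  unfold Spec_classifyfolder
  obtain ⟨ea, ei, et, ev, ec⟩ := pv_counts L
  have cntA := pv_cnt L [".mp3", ".wav"]
    (fun s => PySem.Str.endswith s ".mp3" || PySem.Str.endswith s ".wav")
    (fun s => by simp [List.any_cons, List.any_nil])
  have cntI := pv_cnt L [".png", ".jpg"]
    (fun s => PySem.Str.endswith s ".png" || PySem.Str.endswith s ".jpg")
    (fun s => by simp [List.any_cons, List.any_nil])
  have cntT := pv_cnt L [".txt"] (fun s => PySem.Str.endswith s ".txt")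
    (fun s => by simp [List.any_cons, List.any_nil])
  have cntV := pv_cnt L [".mp4", ".avi"]
    (fun s => PySem.Str.endswith s ".mp4" || PySem.Str.endswith s ".avi")
    (fun s => by simp [List.any_cons, List.any_nil])
  have cntC := pv_cnt L [".csv"] (fun s => PySem.Str.endswith s ".csv")
    (fun s => by simp [List.any_cons, List.any_nil])
  -- B's table fold is the generic argmax fold over the five (category, count) pairs
  have hB : classifyfolder_alt L =
      ([("audio", (List.countP (fun s => PySem.Str.endswith s ".mp3" || PySem.Str.endswith s ".wav") L : Int)),
        ("image", (List.countP (fun s => PySem.Str.endswith s ".png" || PySem.Str.endswith s ".jpg") L : Int)),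
        ("text",  (List.countP (fun s => PySem.Str.endswith s ".txt") L : Int)),
        ("video", (List.countP (fun s => PySem.Str.endswith s ".mp4" || PySem.Str.endswith s ".avi") L : Int)),
        ("csv",   (List.countP (fun s => PySem.Str.endswith s ".csv") L : Int))].foldl
        (fun best ce => if best.2 < ce.2 then (ce.1, ce.2) else best) ("audio", (-1 : Int))).1 := by
    simp only [classifyfolder_alt, List.foldl_cons, List.foldl_nil, cntA, cntI, cntT, cntV, cntC]
  rw [hB, pv_foldl_argmax]
  simp only [classifyfolder, List.map_cons, List.map_nil, PySem.List.count_eq,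
    ea, ei, et, ev, ec, PySem.List.max?_id_cons, Option.getD_some]
  have hseed : List.foldl max (-1 : Int)
      [(List.countP (fun s => PySem.Str.endswith s ".mp3" || PySem.Str.endswith s ".wav") L : Int),
       (List.countP (fun s => PySem.Str.endswith s ".png" || PySem.Str.endswith s ".jpg") L : Int),
       (List.countP (fun s => PySem.Str.endswith s ".txt") L : Int),
       (List.countP (fun s => PySem.Str.endswith s ".mp4" || PySem.Str.endswith s ".avi") L : Int),
       (List.countP (fun s => PySem.Str.endswith s ".csv") L : Int)]
      = List.foldl max
        (List.countP (fun s => PySem.Str.endswith s ".mp3" || PySem.Str.endswith s ".wav") L : Int)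
        [(List.countP (fun s => PySem.Str.endswith s ".png" || PySem.Str.endswith s ".jpg") L : Int),
         (List.countP (fun s => PySem.Str.endswith s ".txt") L : Int),
         (List.countP (fun s => PySem.Str.endswith s ".mp4" || PySem.Str.endswith s ".avi") L : Int),
         (List.countP (fun s => PySem.Str.endswith s ".csv") L : Int)] := by
    have h0 : (-1 : Int) ≤ (List.countP (fun s => PySem.Str.endswith s ".mp3" || PySem.Str.endswith s ".wav") L : Int) := by omega
    rw [List.foldl_cons, max_eq_right h0]
  rw [hseed]
  set Na : Int := (List.countP (fun s => PySem.Str.endswith s ".mp3" || PySem.Str.endswith s ".wav") L : Int) with hNa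
  set Ni : Int := (List.countP (fun s => PySem.Str.endswith s ".png" || PySem.Str.endswith s ".jpg") L : Int) with hNi
  set Nt : Int := (List.countP (fun s => PySem.Str.endswith s ".txt") L : Int) with hNt
  set Nv : Int := (List.countP (fun s => PySem.Str.endswith s ".mp4" || PySem.Str.endswith s ".avi") L : Int) with hNv
  set Nc : Int := (List.countP (fun s => PySem.Str.endswith s ".csv") L : Int) with hNc
  set M : Int := List.foldl max Na [Ni, Nt, Nv, Nc] with hM
  have hMge : Na ≤ M := by rw [hM]; exact (PySem.List.le_foldl_max _ _).1
  have hNa0 : 0 ≤ Na := by rw [hNa]; exact Int.natCast_nonneg _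
  have hneg : (-1 : Int) < M := by omega
  have hmem : M ∈ [Na, Ni, Nt, Nv, Nc] := by
    rcases pv_mem_foldl_max [Ni, Nt, Nv, Nc] Na with h | h
    · rw [hM, h]; exact List.mem_cons_self
    · rw [← hM] at h; exact List.mem_cons_of_mem _ h
  obtain ⟨i, hi⟩ := Option.isSome_iff_exists.mp ((PySem.List.index?_isSome_iff _ _).mpr hmem)
  rw [if_pos hneg, hi]
  simp [PySem.List.pyGet?_natCast, List.getD_eq_getElem?_getD]
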